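-- pv_equiv track=rewrite | github.com/seonwookim92/watson-eval | OntologyExtractor/TextItDown/postprocessors/table_describer.py | _iter_table_blocks
-- ===== SOURCE A (Python) =====
-- def _is_table_row(line: str) -> bool:
--     return "|" in line
--
-- def _is_table_separator(line: str) -> bool:
--     stripped = line.strip()
--     if not stripped:
--         return False
--     if "|" not in stripped:
--         return False
--     return all(
--         token.replace(" ", "").replace(":", "").replace("-", "") == ""
--         for token in [part.strip() for part in stripped.strip("|").split("|")]
--         if token
--     )
--
-- def _iter_table_blocks(lines: list[str]):
--     index = 0
--     while index < len(lines):
--         current = lines[index].rstrip("\n")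
--         if _is_table_row(current) and index + 1 < len(lines) and _is_table_separator(lines[index + 1]):
--             start = index
--             index += 2
--             while index < len(lines) and _is_table_row(lines[index]):
--                 index += 1
--             yield start, index
--         else:
--             index += 1
-- ===== SOURCE B (Python) =====
-- def _is_table_row(line: str) -> bool:
--     return "|" in line
--
-- def _is_table_separator(line: str) -> bool:
--     stripped = line.strip()
--     if not stripped:
--         return False
--     if "|" not in stripped:
--         return False
--     return all(
--         token.replace(" ", "").replace(":", "").replace("-", "") == ""
--         for token in [part.strip() for part in stripped.strip("|").split("|")]
--         if token
--     )
--
-- def _iter_table_blocks(lines: list[str]):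
--     # One flat pass with an explicit in-table state flag instead of nested while loops.
--     n = len(lines)
--     in_table = False
--     start = 0
--     for i, line in enumerate(lines):
--         if in_table and not _is_table_row(line):
--             yield start, i
--             in_table = False
--         if not in_table and _is_table_row(line.rstrip("\n")) and i + 1 < n and _is_table_separator(lines[i + 1]):
--             in_table = True
--             start = i
--     if in_table:
--         yield start, n
-- ===== Notes on version B (the rewrite author's own statement) =====
-- stated objective: simpler
-- what changed: Replaced the outer-while/inner-while nesting with one flat enumerate pass that keeps an explicit in_table flag and start index, closing a block at the first non-row line and at end of input.
import Mathlib
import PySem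

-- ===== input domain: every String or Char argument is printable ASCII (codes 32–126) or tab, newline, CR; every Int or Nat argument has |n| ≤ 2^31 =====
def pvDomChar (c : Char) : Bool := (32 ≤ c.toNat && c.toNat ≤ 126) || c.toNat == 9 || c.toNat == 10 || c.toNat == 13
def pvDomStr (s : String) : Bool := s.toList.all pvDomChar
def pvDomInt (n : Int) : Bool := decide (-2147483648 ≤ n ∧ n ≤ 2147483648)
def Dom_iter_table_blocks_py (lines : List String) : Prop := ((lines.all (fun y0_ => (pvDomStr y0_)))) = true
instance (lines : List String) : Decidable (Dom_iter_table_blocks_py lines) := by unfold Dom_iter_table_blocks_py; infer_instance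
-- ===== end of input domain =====

-- B replaces A's nested while loops by one flat pass with an explicit in-table flag (objective: simpler).

-- ===== PORT A =====
-- shared helper: Python `_is_table_row` (used verbatim by both sources)
def isTableRow (line : String) : Bool := PySem.Str.isIn "|" line

-- hand port of `line.rstrip("\n")` (PySem has no rstrip-with-chars): drop trailing '\n' characters; exact on all strings
def pyRstripNL (line : String) : String :=
  String.ofList ((line.toList.reverse.dropWhile (fun c => c == '\n')).reverse)

-- shared helper: Python `_is_table_separator` (used verbatim by both sources);
-- `stripped.strip("|").split("|")` always succeeds since the separator "|" is nonempty, so `.getD []` is never taken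
def isTableSep (line : String) : Bool :=
  let stripped := PySem.Str.strip line
  if stripped = "" then false
  else if PySem.Str.isIn "|" stripped = false then false
  else
    (((PySem.Str.split? (PySem.Str.stripChars stripped "|") "|").getD []).map PySem.Str.strip).all
      (fun token => if token = "" then true
        else PySem.Str.replace (PySem.Str.replace (PySem.Str.replace token " " "") ":" "") "-" "" = "")

-- A's inner while loop: advance while the current line is a table row
def rowsEndA (lines : List String) (index : Nat) : Nat :=
  if h : index < lines.length then
    if isTableRow lines[index] then rowsEndA lines (index + 1) else index
  else index
termination_by lines.length - index

theorem rowsEndA_ge (lines : List String) (index : Nat) : index ≤ rowsEndA lines index := by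
  unfold rowsEndA
  split
  · split
    · exact le_trans (Nat.le_succ index) (rowsEndA_ge lines (index + 1))
    · exact le_refl _
  · exact le_refl _
termination_by lines.length - index

-- A's outer while loop
def goA (lines : List String) (index : Nat) : List (Int × Int) :=
  if h : index < lines.length then
    let current := pyRstripNL lines[index]
    if isTableRow current && decide (index + 1 < lines.length) && isTableSep (lines.getD (index + 1) "") then
      let stop := rowsEndA lines (index + 2)
      ((index : Int), (stop : Int)) :: goA lines stop
    else goA lines (index + 1)
  else []
termination_by lines.length - index
decreasing_by
  · have := rowsEndA_ge lines (index + 2); omega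
  · omega

def iter_table_blocks_py (lines : List String) : List (Int × Int) := goA lines 0

-- ===== PORT B =====
-- B's single flat loop over enumerate(lines); `rest` is the suffix of `lines` starting at index i,
-- so `lines[i+1]` is the head of `tail` and `i + 1 < n` is `tail ≠ []`
def goB (n : Nat) (rest : List String) (i : Nat) (inTable : Bool) (start : Nat)
    (acc : List (Int × Int)) : List (Int × Int) :=
  match rest with
  | [] => if inTable then acc ++ [((start : Int), (n : Int))] else acc
  | line :: tail =>
    let acc' := if inTable && !isTableRow line then acc ++ [((start : Int), (i : Int))] else acc
    let inT' := inTable && isTableRow line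
    if !inT' && isTableRow (pyRstripNL line) &&
        (match tail with | [] => false | next :: _ => isTableSep next) then
      goB n tail (i + 1) true i acc'
    else
      goB n tail (i + 1) inT' start acc'

def iter_table_blocks_py_alt (lines : List String) : List (Int × Int) :=
  goB lines.length lines 0 false 0 []

-- ===== PRECONDITION & SPEC =====
def Spec_iter_table_blocks_py (lines : List String) (out : List (Int × Int)) : Prop := out = iter_table_blocks_py_alt lines
instance (lines : List String) (out : List (Int × Int)) : Decidable (Spec_iter_table_blocks_py lines out) := by unfold Spec_iter_table_blocks_py; infer_instance

-- ===== CLAIM (what is proved, stated in full; the proofs are below) =====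
def Claim_equal_iter_table_blocks_py : Prop := ∀ (lines : List String), Dom_iter_table_blocks_py lines → Spec_iter_table_blocks_py lines (iter_table_blocks_py lines)

-- ===== LEMMAS AND PROOFS =====

-- a one-character string is in s iff the character is a member of s.toList
theorem isIn_singleton_iff (c : Char) (s : List Char) :
    PySem.Chars.isIn [c] s = true ↔ c ∈ s := by
  rw [PySem.Chars.isIn_iff_infix]
  constructor
  · intro h; exact h.sublist.mem (List.mem_singleton_self c)
  · intro h
    obtain ⟨s1, s2, rfl⟩ := List.append_of_mem h
    exact ⟨s1, s2, by simp⟩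

theorem isTableRow_rstrip_false (line : String) (h : isTableRow line = false) :
    isTableRow (pyRstripNL line) = false := by
  unfold isTableRow pyRstripNL at *
  rw [PySem.Str.isIn_eq] at *
  have hl : ("|" : String).toList = ['|'] := rfl
  rw [hl] at h ⊢
  rw [String.toList_ofList]
  by_contra hc
  have hmem : '|' ∈ (line.toList.reverse.dropWhile (fun x => x == '\n')).reverse :=
    (isIn_singleton_iff '|' _).mp (Bool.not_eq_false _ |>.mp hc)
  rw [List.mem_reverse] at hmem
  have hm2 := (List.dropWhile_sublist (l := line.toList.reverse) (fun x => x == '\n')).mem hmem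
  rw [List.mem_reverse] at hm2
  rw [(isIn_singleton_iff '|' line.toList).mpr hm2] at h
  exact Bool.true_eq_false.mp h

-- a separator line contains '|', hence is a table row
theorem isTableSep_isRow (line : String) (h : isTableSep line = true) :
    isTableRow line = true := by
  unfold isTableSep at h
  simp only at h
  split_ifs at h with h1 h2
  have hin : PySem.Str.isIn "|" (PySem.Str.strip line) = true := Bool.not_eq_false _ |>.mp h2
  rw [PySem.Str.isIn_eq] at hin
  have hl : ("|" : String).toList = ['|'] := rfl
  rw [hl, PySem.Str.toList_strip] at hin
  have hm := (isIn_singleton_iff '|' _).mp hin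
  unfold PySem.Chars.strip PySem.Chars.rstrip PySem.Chars.lstrip at hm
  rw [List.mem_reverse] at hm
  have hm2 := (List.dropWhile_sublist (l := (line.toList.dropWhile PySem.Chars.isspace).reverse)
    PySem.Chars.isspace).mem hm
  rw [List.mem_reverse] at hm2
  have hm3 := (List.dropWhile_sublist (l := line.toList) PySem.Chars.isspace).mem hm2
  unfold isTableRow
  rw [PySem.Str.isIn_eq, hl]
  exact (isIn_singleton_iff '|' line.toList).mpr hm3

-- if lines[index] is a row, the inner scan from index equals the scan from index+1
theorem rowsEndA_step (lines : List String) (index : Nat) (h : index < lines.length)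
    (hrow : isTableRow lines[index] = true) :
    rowsEndA lines index = rowsEndA lines (index + 1) := by
  rw [rowsEndA]; simp [h, hrow]

-- main invariant: running B's flat loop on the suffix of `lines` starting at i produces
-- acc followed by what A produces from the corresponding state
theorem goB_goA (lines : List String) (k i : Nat) (hk : lines.length - i = k) (hi : i ≤ lines.length)
    (inTable : Bool) (start : Nat) (acc : List (Int × Int)) :
    goB lines.length (lines.drop i) i inTable start acc =
      acc ++ (if inTable
        then ((start : Int), (rowsEndA lines i : Int)) :: goA lines (rowsEndA lines i)
        else goA lines i) := by
  induction k generalizing i inTable start acc with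
  | zero =>
    have hin : i = lines.length := by omega
    subst hin
    have hA : goA lines lines.length = [] := by rw [goA]; simp
    have hR : rowsEndA lines lines.length = lines.length := by rw [rowsEndA]; simp
    rw [List.drop_length]
    simp only [goB, hA, hR]
    cases inTable <;> simp
  | succ k ih =>
    have hlt : i < lines.length := by omega
    rw [List.drop_eq_getElem_cons hlt]
    simp only [goB]
    have hdg : lines.getD (i + 1) "" = (match lines.drop (i + 1) with
        | [] => "" | next :: _ => next) := by
      rcases h : lines.drop (i + 1) with _ | ⟨nx, tl⟩
      · have hle := List.drop_eq_nil_iff.mp h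
        simp [List.getD, List.getElem?_eq_none (by omega : lines.length ≤ i + 1)]
      · have hlen : i + 1 < lines.length := by
          have := congrArg List.length h; simp at this; omega
        rw [List.drop_eq_getElem_cons hlen] at h
        obtain ⟨h1, -⟩ := List.cons.inj h
        simp [List.getD, List.getElem?_eq_getElem hlen, h1]
    have htail : (decide (i + 1 < lines.length)) = (match lines.drop (i + 1) with
        | [] => false | _ :: _ => true) := by
      rcases h : lines.drop (i + 1) with _ | ⟨nx, tl⟩
      · have hle := List.drop_eq_nil_iff.mp h
        simp; omega
      · have hlen : i + 1 < lines.length := by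
          have := congrArg List.length h; simp at this; omega
        simp [hlen]
    cases hTab : inTable with
    | false =>
      simp only [Bool.false_and, Bool.not_false, Bool.true_and]
      by_cases hopen : (isTableRow (pyRstripNL lines[i]) &&
          (match lines.drop (i + 1) with | [] => false | next :: _ => isTableSep next)) = true
      · -- open a new block at i
        rw [if_pos hopen]
        have hcond : (isTableRow (pyRstripNL lines[i]) && decide (i + 1 < lines.length) &&
            isTableSep (lines.getD (i + 1) "")) = true := by
          rw [hdg, htail]
          rcases h : lines.drop (i + 1) with _ | ⟨nx, tl⟩ <;> simp_all
        have hA : goA lines i = ((i : Int), (rowsEndA lines (i + 2) : Int)) ::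
            goA lines (rowsEndA lines (i + 2)) := by
          rw [goA]
          simp only [hlt, dite_true]
          rw [if_pos hcond]
        have hsep : isTableSep (lines.getD (i + 1) "") = true := by
          rw [hdg]
          rcases h : lines.drop (i + 1) with _ | ⟨nx, tl⟩ <;> simp_all
        have hi1 : i + 1 < lines.length := by
          rcases h : lines.drop (i + 1) with _ | ⟨nx, tl⟩
          · rw [h] at hopen; simp at hopen
          · have := congrArg List.length h; simp at this; omega
        have hrow1 : isTableRow lines[i + 1] = true := by
          apply isTableSep_isRow
          have : lines.getD (i + 1) "" = lines[i + 1] := by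
            simp [List.getD, List.getElem?_eq_getElem hi1]
          rwa [this] at hsep
        have hre : rowsEndA lines (i + 1) = rowsEndA lines (i + 2) :=
          rowsEndA_step lines (i + 1) hi1 hrow1
        simp only [Bool.false_eq_true, if_false]
        rw [ih (i + 1) (by omega) (by omega) true i acc]
        simp [hre, hA]
      · rw [if_neg (by simpa using hopen)]
        have hA : goA lines i = goA lines (i + 1) := by
          rw [goA]
          simp only [hlt, dite_true]
          rw [if_neg]
          rw [hdg, htail]
          rcases h : lines.drop (i + 1) with _ | ⟨nx, tl⟩ <;> simp_all
        simp only [Bool.false_eq_true, if_false]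
        rw [ih (i + 1) (by omega) (by omega) false start acc]
        simp [hA]
    | true =>
      by_cases hrow : isTableRow lines[i] = true
      · -- stay inside the block
        simp only [hrow, Bool.true_and, Bool.and_true, Bool.not_true, Bool.false_and]
        rw [if_neg (by simp)]
        simp only [Bool.false_eq_true, if_false]
        rw [ih (i + 1) (by omega) (by omega) true start acc]
        rw [rowsEndA_step lines i hlt hrow]
        simp
      · -- close the block at i; the current line is not a row, so no new block opens here
        have hrowf : isTableRow lines[i] = false := by simpa using hrow
        have hrstr : isTableRow (pyRstripNL lines[i]) = false :=
          isTableRow_rstrip_false _ hrowf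
        simp only [hrowf, Bool.and_false, Bool.not_false, Bool.true_and, hrstr]
        rw [if_neg (by simp)]
        have hA : goA lines i = goA lines (i + 1) := by
          rw [goA]
          simp only [hlt, dite_true]
          rw [if_neg (by simp [hrstr])]
        simp only [if_pos trivial]
        rw [ih (i + 1) (by omega) (by omega) false start (acc ++ [((start : Int), (i : Int))])]
        have hR : rowsEndA lines i = i := by rw [rowsEndA]; simp [hlt, hrowf]
        simp [hR, hA]

-- ===== VERDICT (by name: the statement is the Claim_ definition above) =====
theorem iter_table_blocks_py_spec : Claim_equal_iter_table_blocks_py := by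
  intro lines _
  unfold Spec_iter_table_blocks_py iter_table_blocks_py iter_table_blocks_py_alt
  have := goB_goA lines lines.length 0 (by omega) (by omega) false 0 []
  simpa using this.symm
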